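-- pv_equiv track=rewrite | github.com/TimeB1729/codeforces | round 1029 (div 3)/pC.py | max_segments
-- ===== SOURCE A (Python) =====
-- from collections import Counter
--
-- def max_segments(A:list) -> int:
--     n = len(A)
--     suffix_freq = Counter(A)
--
--     segments = 0
--     curr_set = set()
--
--     for i in range(n - 1):
--         curr_set.add(A[i])
--         suffix_freq[A[i]] -= 1
--         if suffix_freq[A[i]] == 0:
--             del suffix_freq[A[i]]
--
--         if curr_set.issubset(suffix_freq.keys()):
--             segments += 1
--             curr_set = set()
--
--     return segments + 1
-- ===== SOURCE B (Python) =====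
-- from collections import Counter
--
-- def max_segments(A: list) -> int:
--     suffix = Counter(A)
--     exhausted = 0  # number of distinct values with no occurrence left in the suffix
--     segments = 0
--     for i in range(len(A) - 1):
--         suffix[A[i]] -= 1
--         if suffix[A[i]] == 0:
--             exhausted += 1
--         if exhausted == 0:
--             segments += 1
--     return segments + 1
-- ===== Notes on version B (the rewrite author's own statement) =====
-- stated objective: faster
-- what changed: B drops the current-segment set and the per-step issubset scan: it maintains a single counter of distinct values exhausted by the prefix (once any value's suffix count hits 0 no further cut can ever happen), so each step is O(1).
import Mathlib
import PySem

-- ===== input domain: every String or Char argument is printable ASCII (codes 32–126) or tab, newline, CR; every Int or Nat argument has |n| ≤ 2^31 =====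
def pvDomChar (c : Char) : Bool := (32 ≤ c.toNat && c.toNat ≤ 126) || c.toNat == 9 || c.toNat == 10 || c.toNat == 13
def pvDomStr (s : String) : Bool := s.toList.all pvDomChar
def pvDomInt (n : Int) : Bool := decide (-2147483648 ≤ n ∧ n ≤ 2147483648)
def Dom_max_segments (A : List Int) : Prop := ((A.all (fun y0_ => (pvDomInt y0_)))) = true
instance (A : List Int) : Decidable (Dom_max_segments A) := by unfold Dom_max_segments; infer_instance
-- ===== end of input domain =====

-- B replaces A's per-step set + issubset scan by an O(1) counter of exhausted values;
-- equivalence of the two loops is proved below (objective: faster, O(n) vs O(n^2)).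

-- ===== PORT A =====
-- loop body of A's for-loop (st = (segments, curr_set, suffix_freq), a = A[i])
def pvStepA (st : Int × PySem.Set Int × PySem.Dict Int Int) (a : Int) :
    Int × PySem.Set Int × PySem.Dict Int Int :=
  let curr_set := PySem.Set.add st.2.1 a
  let sf := st.2.2.modify a 0 (fun v => v - 1)
  let sf := if sf.getD a 0 == 0 then sf.erase a else sf
  if PySem.Set.issubset curr_set sf.keys then (st.1 + 1, PySem.Set.empty, sf)
  else (st.1, curr_set, sf)

def max_segments (A : List Int) : Int :=
  let n : Int := A.length
  ((PySem.List.pyRange 0 (n - 1) 1).foldl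
      (fun st i => pvStepA st (PySem.List.pyGetD A i 0))
      (0, PySem.Set.empty, PySem.Dict.counter A)).1 + 1

-- ===== PORT B =====
-- loop body of B's for-loop (st = (suffix, exhausted, segments), a = A[i])
def pvStepB (st : PySem.Dict Int Int × Int × Int) (a : Int) :
    PySem.Dict Int Int × Int × Int :=
  let suffix := st.1.modify a 0 (fun v => v - 1)
  let exhausted := if suffix.getD a 0 == 0 then st.2.1 + 1 else st.2.1
  let segments := if exhausted == 0 then st.2.2 + 1 else st.2.2
  (suffix, exhausted, segments)

def max_segments_alt (A : List Int) : Int :=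
  ((PySem.List.pyRange 0 ((A.length : Int) - 1) 1).foldl
      (fun st i => pvStepB st (PySem.List.pyGetD A i 0))
      (PySem.Dict.counter A, 0, 0)).2.2 + 1

-- ===== PRECONDITION & SPEC =====
def Spec_max_segments (A : List Int) (out : Int) : Prop := out = max_segments_alt A
instance (A : List Int) (out : Int) : Decidable (Spec_max_segments A out) := by unfold Spec_max_segments; infer_instance

-- ===== CLAIM (what is proved, stated in full; the proofs are below) =====
def Claim_equal_max_segments : Prop := ∀ (A : List Int), Dom_max_segments A → Spec_max_segments A (max_segments A)

-- ===== LEMMAS AND PROOFS =====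

-- the loop 'for i in range(len(A)-1)' reads exactly A.dropLast, in order
lemma foldl_pyRange_getD_eq_dropLast {β : Type} (A : List Int) (f : β → Int → β) (init : β) :
    List.foldl (fun st i => f st (PySem.List.pyGetD A i 0)) init
      (PySem.List.pyRange 0 ((A.length : Int) - 1) 1)
      = List.foldl f init A.dropLast := by
  rcases eq_or_ne A [] with rfl | h
  · simp
  · have hpos : 0 < A.length := List.length_pos_of_ne_nil h
    have hlen : (A.length : Int) - 1 = (A.dropLast.length : Int) := by
      simp [List.length_dropLast]; omega
    rw [hlen]
    have conv1 : ∀ (acc : β), ∀ i ∈ PySem.List.pyRange 0 (A.dropLast.length : Int) 1,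
        f acc (PySem.List.pyGetD A i 0) = f acc (PySem.List.pyGetD A.dropLast i 0) := by
      intro acc i hi
      rw [PySem.List.mem_pyRange_one] at hi
      congr 1
      have hi2 : i < (A.dropLast.length : Int) := hi.2
      have hiA : i < (A.length : Int) := by
        rw [← hlen] at hi2; omega
      rw [PySem.List.pyGetD_eq_getElem A (0:Int) hi.1 hiA,
          PySem.List.pyGetD_eq_getElem A.dropLast (0:Int) hi.1 hi2]
      have hlt : i.toNat < A.dropLast.length := by
        simp [List.length_dropLast]; omega
      exact (List.getElem_dropLast hlt).symm
    rw [PySem.List.foldl_congr_mem _ _ _ _ conv1]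
    exact PySem.List.foldl_pyRange_zero_pyGetD' A.dropLast 0 f init

-- small facts about Dict.erase (assoc-list filter)
lemma pv_find?_filter (l : List (Int × Int)) (k x : Int) :
    (l.filter (fun p => !(p.1 == k))).find? (fun p => p.1 == x)
      = if x = k then none else l.find? (fun p => p.1 == x) := by
  induction l with
  | nil => simp
  | cons p t ih =>
    rw [List.filter_cons]
    by_cases hpk : p.1 = k
    · rw [if_neg (by simp [hpk]), ih]
      by_cases hxk : x = k
      · simp [hxk]
      · have hne : ¬ p.1 = x := by rw [hpk]; exact fun h => hxk h.symm
        rw [if_neg hxk, if_neg hxk, List.find?_cons_of_neg (by simp [hne])]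
    · rw [if_pos (by simp [hpk])]
      by_cases hpx : p.1 = x
      · have hxk : ¬ x = k := fun h => hpk (hpx.trans h)
        rw [List.find?_cons_of_pos (by simp [hpx]),
            List.find?_cons_of_pos (by simp [hpx]), if_neg hxk]
      · rw [List.find?_cons_of_neg (by simp [hpx]),
            List.find?_cons_of_neg (by simp [hpx]), ih]

lemma pv_get?_erase (d : PySem.Dict Int Int) (k x : Int) :
    (d.erase k).get? x = if x = k then none else d.get? x := by
  rcases d with ⟨items⟩
  show (Option.map (fun p => p.2)
      ((items.filter (fun p => !(p.1 == k))).find? (fun p => p.1 == x)))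
    = if x = k then none else Option.map (fun p => p.2) (items.find? (fun p => p.1 == x))
  rw [pv_find?_filter]
  by_cases hxk : x = k <;> simp [hxk]

lemma pv_getD_erase (d : PySem.Dict Int Int) (k x : Int) :
    (d.erase k).getD x 0 = if x = k then 0 else d.getD x 0 := by
  simp only [PySem.Dict.getD, pv_get?_erase]
  by_cases hxk : x = k <;> simp [hxk]

lemma pv_mem_keys_erase (d : PySem.Dict Int Int) (k x : Int) :
    x ∈ (d.erase k).keys ↔ x ≠ k ∧ x ∈ d.keys := by
  simp only [PySem.Dict.keys, PySem.Dict.erase, List.mem_map, List.mem_filter]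
  constructor
  · rintro ⟨p, ⟨hp, hne⟩, rfl⟩
    simp only [Bool.not_eq_eq_eq_not, Bool.not_true, beq_eq_false_iff_ne, ne_eq] at hne
    exact ⟨hne, p, hp, rfl⟩
  · rintro ⟨hne, p, hp, rfl⟩
    exact ⟨p, ⟨hp, by simp [hne]⟩, rfl⟩

-- joint loop invariant: A's (segments, curr_set, suffix_freq) vs B's (suffix, exhausted, segments)
lemma pv_loop_inv (L : List Int) : ∀ (T : List Int) (curr : PySem.Set Int)
    (dA cB : PySem.Dict Int Int) (segA ex segB : Int),
    segA = segB → 0 ≤ ex →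
    (∀ x, dA.getD x 0 = ((L ++ T).count x : Int)) →
    (∀ x, x ∈ dA.keys ↔ (L ++ T).count x ≠ 0) →
    (∀ x, cB.getD x 0 = ((L ++ T).count x : Int)) →
    ((ex = 0 ∧ curr = PySem.Set.empty) ∨ (ex ≠ 0 ∧ ∃ x ∈ curr, (L ++ T).count x = 0)) →
    (L.foldl pvStepA (segA, curr, dA)).1 = (L.foldl pvStepB (cB, ex, segB)).2.2 := by
  induction L with
  | nil =>
    intro T curr dA cB segA ex segB hseg _ _ _ _ _
    simpa using hseg
  | cons a L' ih =>
    intro T curr dA cB segA ex segB hseg hex hA hK hB hcurr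
    simp only [List.foldl_cons]
    -- counts in the remainder after consuming a
    have hcons : ∀ x, ((a :: L') ++ T).count x
        = (L' ++ T).count x + (if x = a then 1 else 0) := by
      intro x
      rcases eq_or_ne x a with rfl | hxa
      · simp
      · simp [hxa, show ¬ a = x from fun h => hxa h.symm]
    have hB1 : ∀ x, (cB.modify a 0 (fun v => v - 1)).getD x 0 = ((L' ++ T).count x : Int) := by
      intro x
      rw [PySem.Dict.getD_modify]
      rcases eq_or_ne x a with rfl | hxa
      · rw [if_pos rfl, hB x, hcons x, if_pos rfl]
        push_cast; ring
      · rw [if_neg hxa, hB x, hcons x, if_neg hxa]; simp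
    have hA1 : ∀ x, (dA.modify a 0 (fun v => v - 1)).getD x 0 = ((L' ++ T).count x : Int) := by
      intro x
      rw [PySem.Dict.getD_modify]
      rcases eq_or_ne x a with rfl | hxa
      · rw [if_pos rfl, hA x, hcons x, if_pos rfl]
        push_cast; ring
      · rw [if_neg hxa, hA x, hcons x, if_neg hxa]; simp
    have hK1 : ∀ x, x ∈ (dA.modify a 0 (fun v => v - 1)).keys ↔ x = a ∨ x ∈ dA.keys := by
      intro x
      rw [PySem.Dict.keys_modify]
      exact PySem.Dict.mem_keys_insert _ _ _ _
    set c' : Nat := (L' ++ T).count a with hc'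
    have hga : (dA.modify a 0 (fun v => v - 1)).getD a 0 = (c' : Int) := hA1 a
    have hgb : (cB.modify a 0 (fun v => v - 1)).getD a 0 = (c' : Int) := hB1 a
    by_cases hc : c' = 0
    · -- a is now exhausted: A erases the key, B bumps `exhausted`; no cut ever again
      have hkeyserase : ∀ x, x ∈ ((dA.modify a 0 (fun v => v - 1)).erase a).keys
          ↔ (L' ++ T).count x ≠ 0 := by
        intro x
        rw [pv_mem_keys_erase, hK1, hK x]
        rcases eq_or_ne x a with rfl | hxa
        · have h0 : List.count x (L' ++ T) = 0 := by rw [← hc']; exact hc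
          exact ⟨fun h => absurd rfl h.1, fun hne => absurd h0 hne⟩
        · rw [hcons x, if_neg hxa]
          simp [hxa]
      have hnosub : PySem.Set.issubset (PySem.Set.add curr a)
          ((dA.modify a 0 (fun v => v - 1)).erase a).keys = false := by
        rw [Bool.eq_false_iff]
        intro hsub
        rw [PySem.Set.issubset_iff] at hsub
        exact (hkeyserase a).mp (hsub a ((PySem.Set.mem_add _ _ _).mpr (Or.inr rfl))) hc
      have hzero : ((c' : Int) == 0) = true := by simp [hc]
      have hplus : ((ex + 1 : Int) == 0) = false := by simp; omega
      have hstepA : pvStepA (segA, curr, dA) a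
          = (segA, PySem.Set.add curr a, (dA.modify a 0 (fun v => v - 1)).erase a) := by
        simp only [pvStepA, hga, hzero, if_true, hnosub, Bool.false_eq_true, if_false]
      have hstepB : pvStepB (cB, ex, segB) a
          = (cB.modify a 0 (fun v => v - 1), ex + 1, segB) := by
        simp only [pvStepB, hgb, hzero, if_true, hplus, Bool.false_eq_true, if_false]
      rw [hstepA, hstepB]
      apply ih T _ _ _ _ _ _ hseg (by omega)
      · intro x
        rw [pv_getD_erase]
        rcases eq_or_ne x a with rfl | hxa
        · rw [if_pos rfl, ← hc', hc]; simp
        · rw [if_neg hxa]; exact hA1 x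
      · exact hkeyserase
      · exact hB1
      · exact Or.inr ⟨by omega, a, (PySem.Set.mem_add _ _ _).mpr (Or.inr rfl),
          by rw [← hc']; exact hc⟩
    · -- a still occurs later: key survives; cut iff the current prefix is clean, i.e. ex = 0
      have hKeep : ∀ x, x ∈ (dA.modify a 0 (fun v => v - 1)).keys ↔ (L' ++ T).count x ≠ 0 := by
        intro x
        rw [hK1, hK x]
        rcases eq_or_ne x a with rfl | hxa
        · exact iff_of_true (Or.inl rfl) (by rw [← hc']; exact hc)
        · rw [hcons x, if_neg hxa]; simp [hxa]
      have hnz : ((c' : Int) == 0) = false := by simp [hc]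
      have hstepB1 : pvStepB (cB, ex, segB) a
          = (cB.modify a 0 (fun v => v - 1), ex,
              if (ex == 0) then segB + 1 else segB) := by
        simp only [pvStepB, hgb, hnz, Bool.false_eq_true, if_false]
      rcases hcurr with ⟨hex0, hcemp⟩ | ⟨hexne, x0, hx0mem, hx0c⟩
      · -- clean prefix: the subset test succeeds, both sides cut
        have hsub : PySem.Set.issubset (PySem.Set.add curr a)
            (dA.modify a 0 (fun v => v - 1)).keys = true := by
          rw [PySem.Set.issubset_iff]
          intro x hx
          rw [hcemp] at hx
          rcases (PySem.Set.mem_add _ _ _).mp hx with h' | rfl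
          · exact absurd h' (by simp [PySem.Set.empty])
          · exact (hKeep x).mpr hc
        have hstepA : pvStepA (segA, curr, dA) a
            = (segA + 1, PySem.Set.empty, dA.modify a 0 (fun v => v - 1)) := by
          simp only [pvStepA, hga, hnz, Bool.false_eq_true, if_false, hsub, if_true]
        have hzex : ((ex : Int) == 0) = true := by simp [hex0]
        rw [hstepA, hstepB1, hzex, if_pos rfl]
        apply ih T _ _ _ _ _ _ (by omega) hex hA1 hKeep hB1
        exact Or.inl ⟨hex0, rfl⟩
      · -- blocked: x0 is exhausted and sits in curr_set; no cut on either side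
        have hx0a : x0 ≠ a := by
          intro h; subst h
          rw [hcons x0, if_pos rfl] at hx0c; omega
        have hx0c' : (L' ++ T).count x0 = 0 := by
          rw [hcons x0, if_neg hx0a] at hx0c; omega
        have hnosub : PySem.Set.issubset (PySem.Set.add curr a)
            (dA.modify a 0 (fun v => v - 1)).keys = false := by
          rw [Bool.eq_false_iff]
          intro hsub
          rw [PySem.Set.issubset_iff] at hsub
          exact ((hKeep x0).mp (hsub x0 ((PySem.Set.mem_add _ _ _).mpr (Or.inl hx0mem)))) hx0c'
        have hstepA : pvStepA (segA, curr, dA) a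
            = (segA, PySem.Set.add curr a, dA.modify a 0 (fun v => v - 1)) := by
          simp only [pvStepA, hga, hnz, Bool.false_eq_true, if_false, hnosub]
        have hnzex : ((ex : Int) == 0) = false := by simp [hexne]
        rw [hstepA, hstepB1, hnzex, if_neg (by simp)]
        apply ih T _ _ _ _ _ _ hseg hex hA1 hKeep hB1
        exact Or.inr ⟨hexne, x0, (PySem.Set.mem_add _ _ _).mpr (Or.inl hx0mem), hx0c'⟩

-- ===== VERDICT (by name: the statement is the Claim_ definition above) =====
theorem max_segments_spec : Claim_equal_max_segments := by
  intro A _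
  simp only [Spec_max_segments, max_segments, max_segments_alt]
  rw [foldl_pyRange_getD_eq_dropLast, foldl_pyRange_getD_eq_dropLast]
  have hsplit : A.dropLast ++ A.drop (A.length - 1) = A := by
    rcases eq_or_ne A [] with rfl | h
    · simp
    · rw [List.dropLast_eq_take, ← List.take_append_drop (A.length - 1) A]
      simp [List.take_append_drop]
  have := pv_loop_inv A.dropLast (A.drop (A.length - 1)) PySem.Set.empty
      (PySem.Dict.counter A) (PySem.Dict.counter A) 0 0 0 rfl le_rfl
      (by intro x; rw [hsplit]; exact PySem.Dict.getD_counter A x)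
      (by intro x
          rw [hsplit, PySem.Dict.keys_counter, PySem.Set.mem_ofList]
          simp [List.count_eq_zero])
      (by intro x; rw [hsplit]; exact PySem.Dict.getD_counter A x)
      (Or.inl ⟨rfl, rfl⟩)
  omega
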